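-- pv_equiv track=rewrite | github.com/GusFiveO/adventOfCode-2024 | day07/resolve_operations_with_concatenation.py | resolve_left_to_right
-- ===== SOURCE A (Python) =====
-- def resolve_left_to_right(target, numbers, operators):
--     res = numbers[0]
--     for i in range(len(operators)):
--             if numbers[0] > target:
--                 return numbers
--             if operators[i] == '*':
--                 numbers[i + 1] = numbers[i] * numbers[i + 1]
--                 return resolve_left_to_right(target, numbers[i + 1:], operators[i + 1:])
--             elif operators[i] == '+':
--                 numbers[i + 1] = numbers[i] + numbers[i + 1]
--                 return resolve_left_to_right(target, numbers[i + 1:], operators[i + 1:])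
--             elif operators[i] == '||':
--                 numbers[i + 1] = int(f"{numbers[i]}{numbers[i + 1]}")
--                 return resolve_left_to_right(target, numbers[i + 1:], operators[i + 1:])
--     return numbers
-- ===== SOURCE B (Python) =====
-- def resolve_left_to_right(target, numbers, operators):
--     # One while-loop with window offsets instead of recursive list slicing.
--     # Return-value equivalent to A; does not mutate `numbers` (A writes one cell).
--     nums = list(numbers)
--     bn = bo = i = 0  # bn: start of current window in nums, bo: in operators, i: offset
--     n_ops = len(operators)
--     while bo + i < n_ops:
--         if nums[bn] > target:
--             break
--         op = operators[bo + i]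
--         if op == '*':
--             nums[bn + i + 1] = nums[bn + i] * nums[bn + i + 1]
--         elif op == '+':
--             nums[bn + i + 1] = nums[bn + i] + nums[bn + i + 1]
--         elif op == '||':
--             nums[bn + i + 1] = int(f"{nums[bn + i]}{nums[bn + i + 1]}")
--         else:
--             i += 1
--             continue
--         bn += i + 1
--         bo += i + 1
--         i = 0
--     return nums[bn:]
-- ===== Notes on version B (the rewrite author's own statement) =====
-- stated objective: alternative
-- what changed: A recurses, creating fresh list slices (numbers[i+1:], operators[i+1:]) at every combined operator; B runs a single while-loop over the original lists with window offsets bn/bo and scan offset i, taking one slice at the end.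
import Mathlib
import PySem

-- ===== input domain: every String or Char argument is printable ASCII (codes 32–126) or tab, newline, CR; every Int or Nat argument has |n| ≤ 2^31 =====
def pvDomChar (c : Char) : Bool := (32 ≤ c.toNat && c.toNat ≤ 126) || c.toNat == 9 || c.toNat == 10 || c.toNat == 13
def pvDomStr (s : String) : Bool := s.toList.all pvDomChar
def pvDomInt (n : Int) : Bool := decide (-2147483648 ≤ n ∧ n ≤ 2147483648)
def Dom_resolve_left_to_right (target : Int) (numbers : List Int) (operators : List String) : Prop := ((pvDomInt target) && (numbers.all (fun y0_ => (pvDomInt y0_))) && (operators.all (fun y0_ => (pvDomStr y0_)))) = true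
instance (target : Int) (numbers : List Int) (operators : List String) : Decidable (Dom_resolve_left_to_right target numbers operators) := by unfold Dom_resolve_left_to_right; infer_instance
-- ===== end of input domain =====

-- B replaces A's recursion on freshly sliced lists by a single while-loop over the original
-- lists with window offsets (same return value; side effects differ: A writes one cell of
-- `numbers` in place, B works on a copy).

-- ===== PORT A =====
-- int(f"{a}{b}"): ValueError (b < 0) is excluded by Pre_; getD 0 is that excluded case
def pvConcat (a b : Int) : Int :=
  (PySem.Int.ofChars? (PySem.Int.toChars a ++ PySem.Int.toChars b)).getD 0

-- A's for-loop as `go`, with `i` the loop index; the three matched branches are A's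
-- recursive calls on the mutated-then-sliced lists (numbers[i+1] = v; numbers[i+1:], operators[i+1:]).
-- `fuel` only makes the recursion structural: every call decreases it by 1 and the initial
-- operators.length is exactly enough, so fuel 0 is the loop's normal exhaustion (return numbers).
-- A's dead first line `res = numbers[0]` computes an unused value and is not repeated.
def resolve_left_to_right_go : Nat → Int → List Int → List String → Nat → List Int
  | 0, _, numbers, _, _ => numbers
  | f + 1, target, numbers, operators, i =>
    if PySem.List.pyGetD numbers 0 0 > target then numbers
    else if PySem.List.pyGetD operators ((i : Nat) : Int) "" = "*" then
      let v := PySem.List.pyGetD numbers ((i : Nat) : Int) 0 * PySem.List.pyGetD numbers ((i + 1 : Nat) : Int) 0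
      resolve_left_to_right_go f target
        (PySem.List.slice (PySem.List.pySetD numbers ((i + 1 : Nat) : Int) v) (some ((i + 1 : Nat) : Int)) none)
        (PySem.List.slice operators (some ((i + 1 : Nat) : Int)) none) 0
    else if PySem.List.pyGetD operators ((i : Nat) : Int) "" = "+" then
      let v := PySem.List.pyGetD numbers ((i : Nat) : Int) 0 + PySem.List.pyGetD numbers ((i + 1 : Nat) : Int) 0
      resolve_left_to_right_go f target
        (PySem.List.slice (PySem.List.pySetD numbers ((i + 1 : Nat) : Int) v) (some ((i + 1 : Nat) : Int)) none)
        (PySem.List.slice operators (some ((i + 1 : Nat) : Int)) none) 0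
    else if PySem.List.pyGetD operators ((i : Nat) : Int) "" = "||" then
      let v := pvConcat (PySem.List.pyGetD numbers ((i : Nat) : Int) 0) (PySem.List.pyGetD numbers ((i + 1 : Nat) : Int) 0)
      resolve_left_to_right_go f target
        (PySem.List.slice (PySem.List.pySetD numbers ((i + 1 : Nat) : Int) v) (some ((i + 1 : Nat) : Int)) none)
        (PySem.List.slice operators (some ((i + 1 : Nat) : Int)) none) 0
    else resolve_left_to_right_go f target numbers operators (i + 1)

def resolve_left_to_right (target : Int) (numbers : List Int) (operators : List String) : List Int :=
  resolve_left_to_right_go operators.length target numbers operators 0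

-- ===== PORT B =====
-- Source B's while-loop: bn/bo are the starts of the live windows in nums/operators, i the scan
-- offset; a matched operator folds into nums[bn+i+1] and advances the window, an unmatched one
-- advances i.  bo+i grows by exactly 1 per iteration, so `fuel` (started at operators.length)
-- makes the loop condition bo+i < len(operators) structural: fuel 0 is the loop exit (nums[bn:]).
def resolve_left_to_right_alt_go : Nat → Int → List Int → List String → Nat → Nat → Nat → List Int
  | 0, _, nums, _, bn, _, _ => PySem.List.slice nums (some ((bn : Nat) : Int)) none
  | f + 1, target, nums, operators, bn, bo, i =>
    if PySem.List.pyGetD nums ((bn : Nat) : Int) 0 > target then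
      PySem.List.slice nums (some ((bn : Nat) : Int)) none
    else if PySem.List.pyGetD operators ((bo + i : Nat) : Int) "" = "*" then
      resolve_left_to_right_alt_go f target
        (PySem.List.pySetD nums ((bn + i + 1 : Nat) : Int)
          (PySem.List.pyGetD nums ((bn + i : Nat) : Int) 0 * PySem.List.pyGetD nums ((bn + i + 1 : Nat) : Int) 0))
        operators (bn + i + 1) (bo + i + 1) 0
    else if PySem.List.pyGetD operators ((bo + i : Nat) : Int) "" = "+" then
      resolve_left_to_right_alt_go f target
        (PySem.List.pySetD nums ((bn + i + 1 : Nat) : Int)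
          (PySem.List.pyGetD nums ((bn + i : Nat) : Int) 0 + PySem.List.pyGetD nums ((bn + i + 1 : Nat) : Int) 0))
        operators (bn + i + 1) (bo + i + 1) 0
    else if PySem.List.pyGetD operators ((bo + i : Nat) : Int) "" = "||" then
      resolve_left_to_right_alt_go f target
        (PySem.List.pySetD nums ((bn + i + 1 : Nat) : Int)
          (pvConcat (PySem.List.pyGetD nums ((bn + i : Nat) : Int) 0) (PySem.List.pyGetD nums ((bn + i + 1 : Nat) : Int) 0)))
        operators (bn + i + 1) (bo + i + 1) 0
    else resolve_left_to_right_alt_go f target nums operators bn bo (i + 1)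

def resolve_left_to_right_alt (target : Int) (numbers : List Int) (operators : List String) : List Int :=
  resolve_left_to_right_alt_go operators.length target numbers operators 0 0 0

-- ===== PRECONDITION & SPEC =====
-- Spec-level vocabulary for Pre_ (reads the INPUT only; no slicing, no mutation, no port code):
-- which operator strings A recognises, the value a maximal run of consecutive recognised
-- operators accumulates, and the value standing at the front of A's current window just
-- before operator m is considered.

-- the three operator strings A's branches recognise
def pvRecog (s : String) : Bool := s = "*" || s = "+" || s = "||"

-- the recognised operations themselves ('||' guarded: only cited by Pre_ where b ≥ 0)
def pvApply (op : String) (a b : Int) : Int :=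
  if op = "*" then a * b else if op = "+" then a + b else pvConcat a b

-- start of the maximal run of consecutively recognised operators ending at j
def pvRunStart (operators : List String) : Nat → Nat
  | 0 => 0
  | j + 1 => if pvRecog (operators.getD j "") then pvRunStart operators j else j + 1

-- the value accumulated by the run of recognised operators ending at j:
-- fold the operations s..j over numbers[s], numbers[s+1], …, numbers[j+1]
def pvChainVal (numbers : List Int) (operators : List String) (j : Nat) : Int :=
  let s := pvRunStart operators j
  (List.range (j + 1 - s)).foldl
    (fun a t => pvApply (operators.getD (s + t) "") a (numbers.getD (s + t + 1) 0))
    (numbers.getD s 0)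

-- the front value of A's window just before operator m is considered: the value written by
-- the last recognised operator before m, or numbers[0] if there is none
def pvHeadBefore (numbers : List Int) (operators : List String) : Nat → Int
  | 0 => numbers.getD 0 0
  | m + 1 =>
    if pvRecog (operators.getD m "") then pvChainVal numbers operators m
    else pvHeadBefore numbers operators m

-- operator k would make A raise if reached: no numbers[k+1] cell to combine into
-- (IndexError), or '||' with a negative right operand (ValueError in int(f"…"))
def pvBadStep (numbers : List Int) (operators : List String) (k : Nat) : Bool :=
  numbers.length ≤ k + 1 || (operators.getD k "" = "||" && numbers.getD (k + 1) 0 < 0)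

-- Pre_ excludes EXACTLY the inputs on which A raises and nothing else: empty numbers
-- (IndexError at `res = numbers[0]`), or some recognised operator k that would raise
-- (pvBadStep) and is actually reached — i.e. no earlier window-front value exceeds target,
-- so no early exit returns before k.  Every input on which A returns satisfies Pre_.
def Pre_resolve_left_to_right (target : Int) (numbers : List Int) (operators : List String) : Prop :=
  numbers ≠ [] ∧
  ∀ k < operators.length, pvRecog (operators.getD k "") = true →
    pvBadStep numbers operators k = true →
    ∃ m ≤ k, target < pvHeadBefore numbers operators m
instance (target : Int) (numbers : List Int) (operators : List String) : Decidable (Pre_resolve_left_to_right target numbers operators) := by unfold Pre_resolve_left_to_right; infer_instance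

def pvWitness_resolve_left_to_right : Int × List Int × List String := (100, [1, 2, 3], ["+", "||"])

def Spec_resolve_left_to_right (target : Int) (numbers : List Int) (operators : List String) (out : List Int) : Prop := out = resolve_left_to_right_alt target numbers operators
instance (target : Int) (numbers : List Int) (operators : List String) (out : List Int) : Decidable (Spec_resolve_left_to_right target numbers operators out) := by unfold Spec_resolve_left_to_right; infer_instance

-- ===== CLAIM (what is proved, stated in full; the proofs are below) =====
def Claim_equal_resolve_left_to_right : Prop := ∀ (target : Int) (numbers : List Int) (operators : List String), Dom_resolve_left_to_right target numbers operators → Pre_resolve_left_to_right target numbers operators → Spec_resolve_left_to_right target numbers operators (resolve_left_to_right target numbers operators)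

-- ===== LEMMAS AND PROOFS =====

-- writing at offset n+m then dropping n is writing at m in the dropped list
lemma pv_set_drop (xs : List Int) (n m : Nat) (v : Int) :
    (xs.drop n).set m v = (xs.set (n + m) v).drop n := by
  induction n generalizing xs with
  | zero => simp
  | succ k ih =>
    cases xs with
    | nil => simp
    | cons x xs => simpa [Nat.succ_add] using ih xs

lemma pv_getD_drop {α : Type} [Inhabited α] (xs : List α) (n m : Nat) (d : α) :
    (xs.drop n).getD m d = xs.getD (n + m) d := by
  simp [List.getD, List.getElem?_drop]

-- the core correspondence: B's window (bn, bo, i) IS A's recursive call on the sliced lists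
lemma pv_go_eq (f : Nat) (target : Int) (nums : List Int) (operators : List String) (bn bo i : Nat) :
    resolve_left_to_right_alt_go f target nums operators bn bo i =
    resolve_left_to_right_go f target (nums.drop bn) (operators.drop bo) i := by
  induction f generalizing nums operators bn bo i with
  | zero => simp [resolve_left_to_right_alt_go, resolve_left_to_right_go, PySem.List.slice_from_natCast]
  | succ f ih =>
    simp only [resolve_left_to_right_alt_go, resolve_left_to_right_go,
      PySem.List.pyGetD_natCast, PySem.List.pyGetD_zero, PySem.List.pySetD_natCast,
      PySem.List.slice_from_natCast, pv_getD_drop, Nat.add_zero]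
    split_ifs with h1 h2 h3 h4
    · simp
    · rw [ih]; simp [pv_set_drop, List.drop_drop]; ring_nf
    · rw [ih]; simp [pv_set_drop, List.drop_drop]; ring_nf
    · rw [ih]; simp [pv_set_drop, List.drop_drop]; ring_nf
    · exact ih nums operators bn bo (i + 1)

-- ===== VERDICT (by name: the statement is the Claim_ definition above) =====
theorem resolve_left_to_right_spec : Claim_equal_resolve_left_to_right := by
  intro target numbers operators _ _
  unfold Spec_resolve_left_to_right resolve_left_to_right resolve_left_to_right_alt
  simpa using (pv_go_eq operators.length target numbers operators 0 0 0).symm
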